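-- pv_equiv track=rewrite | github.com/pypi-data/pypi-mirror-31 | packages/kopi/kopi-0.18.5.tar.gz/kopi-0.18.5/kopi/Bak_mycson.py | DetectSoftTabLength
-- ===== SOURCE A (Python) =====
-- TAB = "\t" #hard tab
--
-- def DetectSoftTabLength(S):
-- 	# Returns number of space for soft tab.
-- 	# Returns 0 if hard tab or found no soft tab at all.
-- 	# Return -1 if error.
-- 	S = S.split("\n")
-- 	NumOfForeSpaceInEachLine = []
-- 	ThereIsTabBefore = False
--
-- 	for x in S:
-- 		NumOfSpace = 0
-- 		for n in range(len(x)):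
-- 			if x[n] == TAB:
-- 				ThereIsTabBefore = True
-- 				if NumOfSpace != 0:
-- 					# SPACE...SPACE TAB is illegal
-- 					return -1
-- 				else:
-- 					pass
-- 			elif x[n] == " ":
-- 				if ThereIsTabBefore == True:
-- 					# TAB SPACE..SPACE is illegal
-- 					return -1
-- 				NumOfSpace += 1
-- 			else:
-- 				break
-- 		if NumOfSpace > 0:
-- 			if ThereIsTabBefore == True:
-- 				# TAB xxx
-- 				# SPACE ...SPACE xxx
-- 				# is illegal
-- 				return -1
-- 		NumOfForeSpaceInEachLine += [ NumOfSpace]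
--
-- 	MinSpace = 0
-- 	GotIt = False
-- 	for x in NumOfForeSpaceInEachLine:
-- 		if x == 0:
-- 			pass
-- 		else:
-- 			if GotIt == False:
-- 				GotIt = True
-- 				MinSpace = x
-- 			else:
-- 				if x%MinSpace == 0:
-- 					pass
-- 				else:
-- 					#e.g [0, 0, 4, 0, 4, 8] is legal, But
-- 					#    [0, 0, 4, 0, 5, 7] is not legal
-- 					return -1
-- 	return MinSpace
-- ===== SOURCE B (Python) =====
-- def DetectSoftTabLength(S):
--     # Two-pass: classify each line's leading-whitespace prefix with string methods,
--     # then check divisibility of the space counts by the first nonzero count.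
--     counts = []
--     tab_seen = False
--     for line in S.split("\n"):
--         prefix = line[:len(line) - len(line.lstrip(" \t"))]
--         if "\t" in prefix:
--             if " " in prefix:
--                 return -1
--             tab_seen = True
--             counts.append(0)
--         elif prefix:
--             if tab_seen:
--                 return -1
--             counts.append(len(prefix))
--         else:
--             counts.append(0)
--     unit = 0
--     for c in counts:
--         if c != 0:
--             if unit == 0:
--                 unit = c
--             elif c % unit != 0:
--                 return -1
--     return unit
-- ===== Notes on version B (the rewrite author's own statement) =====
-- stated objective: simpler
-- what changed: B replaces A's stateful character-index scan per line with a two-pass decomposition: it extracts each line's leading-whitespace prefix via lstrip/slicing and classifies it as a whole (tab-vs-space membership tests), collects the space counts, then checks divisibility by the first nonzero count in a separate pass.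
import Mathlib
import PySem

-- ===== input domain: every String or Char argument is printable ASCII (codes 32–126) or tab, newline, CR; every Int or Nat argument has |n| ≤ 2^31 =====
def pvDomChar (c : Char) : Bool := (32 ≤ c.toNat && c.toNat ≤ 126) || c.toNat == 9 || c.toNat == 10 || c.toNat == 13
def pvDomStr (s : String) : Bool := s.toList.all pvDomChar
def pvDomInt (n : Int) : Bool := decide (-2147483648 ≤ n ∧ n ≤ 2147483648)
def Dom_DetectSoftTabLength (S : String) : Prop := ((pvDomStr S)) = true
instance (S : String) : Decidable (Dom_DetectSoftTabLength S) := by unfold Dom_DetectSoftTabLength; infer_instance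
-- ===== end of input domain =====

-- B re-implements A by classifying each line's leading-whitespace prefix (string methods)
-- in one pass and checking divisibility of the collected counts in a second pass;
-- objective: simpler decomposition, same exact behaviour.

-- ===== PORT A =====
-- inner 'for n in range(len(x))' loop: state (ThereIsTabBefore, NumOfSpace); none = 'return -1'
def pvLineScanA : List Char → Bool → Int → Option (Bool × Int)
  | [], flag, ns => some (flag, ns)
  | c :: rest, flag, ns =>
    if c = '\t' then
      if ns ≠ 0 then none else pvLineScanA rest true ns
    else if c = ' ' then
      if flag then none else pvLineScanA rest flag (ns + 1)
    else some (flag, ns)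

-- outer 'for x in S' loop building NumOfForeSpaceInEachLine; none = 'return -1'
def pvLinesA : List (List Char) → Bool → List Int → Option (List Int)
  | [], _, acc => some acc
  | x :: rest, flag, acc =>
    match pvLineScanA x flag 0 with
    | none => none
    | some (flag', ns) =>
      if ns > 0 && flag' then none
      else pvLinesA rest flag' (acc ++ [ns])

-- second loop: MinSpace/GotIt scan
def pvDivA : List Int → Bool → Int → Int
  | [], _, m => m
  | x :: rest, got, m =>
    if x = 0 then pvDivA rest got m
    else if got = false then pvDivA rest true x
    else if PySem.Int.mod x m = 0 then pvDivA rest got m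
    else -1

def DetectSoftTabLength (S : String) : Int :=
  match pvLinesA (PySem.Chars.splitOn S.toList ['\n']) false [] with
  | none => -1
  | some acc => pvDivA acc false 0

-- ===== PORT B =====
def pvWsB (c : Char) : Bool := c == ' ' || c == '\t'

-- port of  line[:len(line) - len(line.lstrip(" \t"))]  (lstrip(" \t") drops exactly the pvWsB prefix)
def pvPrefixB (l : List Char) : List Char :=
  l.take (l.length - (l.dropWhile pvWsB).length)

def pvLinesB : List (List Char) → Bool → List Int → Option (List Int)
  | [], _, acc => some acc
  | l :: rest, tabSeen, acc =>
    let p := pvPrefixB l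
    if p.contains '\t' then
      if p.contains ' ' then none
      else pvLinesB rest true (acc ++ [0])
    else if !p.isEmpty then
      if tabSeen then none else pvLinesB rest tabSeen (acc ++ [(p.length : Int)])
    else pvLinesB rest tabSeen (acc ++ [0])

def pvUnitB : List Int → Int → Int
  | [], u => u
  | c :: rest, u =>
    if c ≠ 0 then
      if u = 0 then pvUnitB rest c
      else if PySem.Int.mod c u ≠ 0 then -1
      else pvUnitB rest u
    else pvUnitB rest u

def DetectSoftTabLength_alt (S : String) : Int :=
  match pvLinesB (PySem.Chars.splitOn S.toList ['\n']) false [] with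
  | none => -1
  | some acc => pvUnitB acc 0

-- ===== PRECONDITION & SPEC =====
def Spec_DetectSoftTabLength (S : String) (out : Int) : Prop := out = DetectSoftTabLength_alt S
instance (S : String) (out : Int) : Decidable (Spec_DetectSoftTabLength S out) := by unfold Spec_DetectSoftTabLength; infer_instance

-- ===== CLAIM (what is proved, stated in full; the proofs are below) =====
def Claim_equal_DetectSoftTabLength : Prop := ∀ (S : String), Dom_DetectSoftTabLength S → Spec_DetectSoftTabLength S (DetectSoftTabLength S)

-- ===== LEMMAS AND PROOFS =====

theorem pvPrefixB_eq (l : List Char) : pvPrefixB l = l.takeWhile pvWsB := by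
  have h1 : (l.takeWhile pvWsB).length + (l.dropWhile pvWsB).length = l.length := by
    rw [← List.length_append, List.takeWhile_append_dropWhile]
  have h2 : l.length - (l.dropWhile pvWsB).length = (l.takeWhile pvWsB).length := by omega
  rw [pvPrefixB, h2]
  exact (List.prefix_iff_eq_take.mp (List.takeWhile_prefix pvWsB)).symm

theorem pv_mem_prefix {x : Char} {l : List Char} (h : x ∈ l.takeWhile pvWsB) :
    x = ' ' ∨ x = '\t' := by
  have hp : pvWsB x = true := List.mem_takeWhile_imp h
  simp [pvWsB] at hp
  tauto

theorem pvScanA_true (l : List Char) :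
    pvLineScanA l true 0 =
      if ' ' ∈ l.takeWhile pvWsB then none else some (true, 0) := by
  induction l with
  | nil => simp [pvLineScanA, List.takeWhile_nil]
  | cons c r ih =>
    by_cases ht : c = '\t'
    · subst ht; simpa [pvLineScanA, List.takeWhile_cons, pvWsB] using ih
    · by_cases hs : c = ' '
      · subst hs; simp [pvLineScanA, List.takeWhile_cons, pvWsB]
      · simp [pvLineScanA, List.takeWhile_cons, pvWsB, ht, hs]

theorem pvScanA_sp (l : List Char) : ∀ ns : Int, 0 < ns →
    pvLineScanA l false ns =
      if '\t' ∈ l.takeWhile pvWsB then none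
      else some (false, ns + ((l.takeWhile pvWsB).length : Int)) := by
  induction l with
  | nil => intro ns _; simp [pvLineScanA, List.takeWhile_nil]
  | cons c r ih =>
    intro ns hns
    by_cases ht : c = '\t'
    · subst ht
      simp [pvLineScanA, List.takeWhile_cons, pvWsB]
      intro h; exact absurd h (by omega)
    · by_cases hs : c = ' '
      · subst hs
        simp only [pvLineScanA, List.takeWhile_cons, pvWsB]
        have h1 : (0:Int) < ns + 1 := by omega
        simp [ih (ns + 1) h1]
        split_ifs <;> simp <;> omega
      · simp [pvLineScanA, List.takeWhile_cons, pvWsB, ht, hs]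

theorem pvScanA_false (l : List Char) :
    pvLineScanA l false 0 =
      (if '\t' ∈ l.takeWhile pvWsB then
        (if ' ' ∈ l.takeWhile pvWsB then none else some (true, 0))
      else some (false, ((l.takeWhile pvWsB).length : Int))) := by
  cases l with
  | nil => simp [pvLineScanA, List.takeWhile_nil]
  | cons c r =>
    by_cases ht : c = '\t'
    · subst ht
      simp only [pvLineScanA, List.takeWhile_cons, pvWsB]
      simp [pvScanA_true r]
    · by_cases hs : c = ' '
      · subst hs
        simp only [pvLineScanA, List.takeWhile_cons, pvWsB]
        simp [pvScanA_sp r 1 (by omega)]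
        split_ifs <;> simp <;> omega
      · simp [pvLineScanA, List.takeWhile_cons, pvWsB, ht, hs]

theorem pvLines_eq (lines : List (List Char)) : ∀ (flag : Bool) (acc : List Int),
    pvLinesA lines flag acc = pvLinesB lines flag acc := by
  induction lines with
  | nil => intro flag acc; simp [pvLinesA, pvLinesB]
  | cons x rest ih =>
    intro flag acc
    rw [pvLinesA, pvLinesB]
    simp only [pvPrefixB_eq]
    cases flag with
    | true =>
      rw [pvScanA_true x]
      by_cases hsp : ' ' ∈ x.takeWhile pvWsB
      · have hne : (x.takeWhile pvWsB).isEmpty = false := by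
          cases h : x.takeWhile pvWsB with
          | nil => rw [h] at hsp; simp at hsp
          | cons a b => simp
        by_cases htb : '\t' ∈ x.takeWhile pvWsB
        · simp [hsp, htb]
        · simp [hsp, hne]
      · by_cases htb : '\t' ∈ x.takeWhile pvWsB
        · simp [hsp, htb, ih]
        · have hpe : x.takeWhile pvWsB = [] := by
            cases hpp : x.takeWhile pvWsB with
            | nil => rfl
            | cons a b =>
              rcases pv_mem_prefix (l := x) (x := a) (by rw [hpp]; simp) with h1 | h1
              · rw [hpp, h1] at hsp; simp at hsp
              · rw [hpp, h1] at htb; simp at htb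
          simp [hpe, ih]
    | false =>
      rw [pvScanA_false x]
      by_cases htb : '\t' ∈ x.takeWhile pvWsB
      · by_cases hsp : ' ' ∈ x.takeWhile pvWsB
        · simp [htb, hsp]
        · simp [htb, hsp, ih]
      · by_cases hpe : x.takeWhile pvWsB = []
        · simp [hpe, ih]
        · have hsp : ' ' ∈ x.takeWhile pvWsB := by
            cases hpp : x.takeWhile pvWsB with
            | nil => exact absurd hpp hpe
            | cons a b =>
              rcases pv_mem_prefix (l := x) (x := a) (by rw [hpp]; simp) with h1 | h1
              · simp [h1]
              · rw [hpp, h1] at htb; simp at htb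
          have hlen : (0:Int) < ((x.takeWhile pvWsB).length : Int) := by
            cases hpp : x.takeWhile pvWsB with
            | nil => exact absurd hpp hpe
            | cons a b => simp
          have hne : (x.takeWhile pvWsB).isEmpty = false := by
            simpa [List.isEmpty_iff] using hpe
          simp [htb, hne, ih]

theorem pvLinesB_nonneg (lines : List (List Char)) : ∀ (flag : Bool) (acc out : List Int),
    pvLinesB lines flag acc = some out → (∀ x ∈ acc, 0 ≤ x) → ∀ x ∈ out, 0 ≤ x := by
  induction lines with
  | nil =>
    intro flag acc out h hacc
    simp [pvLinesB] at h
    subst h; exact hacc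
  | cons l rest ih =>
    intro flag acc out h hacc
    rw [pvLinesB] at h
    have step : ∀ v : Int, 0 ≤ v → ∀ x ∈ acc ++ [v], 0 ≤ x := by
      intro v hv x hx
      rcases List.mem_append.mp hx with hx | hx
      · exact hacc x hx
      · simp at hx; omega
    split_ifs at h with h1 h2 h3 h4
    · exact ih _ _ _ h (step 0 le_rfl)
    · exact ih _ _ _ h (step _ (by positivity))
    · exact ih _ _ _ h (step 0 le_rfl)

theorem pvDiv_pos (acc : List Int) : ∀ m : Int, 0 < m →
    pvDivA acc true m = pvUnitB acc m := by
  induction acc with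
  | nil => intro m _; simp [pvDivA, pvUnitB]
  | cons x rest ih =>
    intro m hm
    rw [pvDivA, pvUnitB]
    by_cases hx : x = 0
    · simp [hx, ih m hm]
    · by_cases hmod : PySem.Int.mod x m = 0
      · simp [hx, hmod, ih m hm]
        exact fun h => absurd h (by omega)
      · simp [hx, hmod]
        exact fun h => absurd h (by omega)

theorem pvDiv_zero (acc : List Int) (hnn : ∀ x ∈ acc, 0 ≤ x) :
    pvDivA acc false 0 = pvUnitB acc 0 := by
  induction acc with
  | nil => simp [pvDivA, pvUnitB]
  | cons x rest ih =>
    rw [pvDivA, pvUnitB]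
    by_cases hx : x = 0
    · simp [hx]; exact ih (fun y hy => hnn y (by simp [hy]))
    · have hpos : 0 < x := lt_of_le_of_ne (hnn x (by simp)) (Ne.symm hx)
      simp [hx]
      exact pvDiv_pos rest x hpos

-- ===== VERDICT (by name: the statement is the Claim_ definition above) =====
theorem DetectSoftTabLength_spec : Claim_equal_DetectSoftTabLength := by
  intro S _
  unfold Spec_DetectSoftTabLength DetectSoftTabLength DetectSoftTabLength_alt
  rw [pvLines_eq]
  cases h : pvLinesB (PySem.Chars.splitOn S.toList ['\n']) false [] with
  | none => rfl
  | some acc =>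
    simp only []
    exact pvDiv_zero acc (pvLinesB_nonneg _ _ _ _ h (by simp))
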